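-- pv_equiv track=rewrite | github.com/HeHang0/garage | analysis/plate_pattern.py | max_consecutive_digit_count
-- ===== SOURCE A (Python) =====
-- def max_consecutive_digit_count(n):
--     digits = [int(d) for d in str(n)]
--     max_len = cur_len = 1
--
--     for i in range(1, len(digits)):
--         if digits[i] == digits[i-1] + 1:
--             cur_len += 1
--             max_len = max(max_len, cur_len)
--         else:
--             cur_len = 1  # 重置计数
--     return max_len
-- ===== SOURCE B (Python) =====
-- def max_consecutive_digit_count(n):
--     digits = [int(d) for d in str(n)]
--     breaks = [i for i in range(1, len(digits)) if digits[i] != digits[i - 1] + 1]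
--     bounds = [0] + breaks + [len(digits)]
--     return max(b - a for a, b in zip(bounds, bounds[1:]))
-- ===== Notes on version B (the rewrite author's own statement) =====
-- stated objective: alternative
-- what changed: B replaces A's single running-counter/running-max loop by building the list of break indices (where a digit is not predecessor+1) with a comprehension, forming boundary positions, and taking the max of consecutive boundary differences.
import Mathlib
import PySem

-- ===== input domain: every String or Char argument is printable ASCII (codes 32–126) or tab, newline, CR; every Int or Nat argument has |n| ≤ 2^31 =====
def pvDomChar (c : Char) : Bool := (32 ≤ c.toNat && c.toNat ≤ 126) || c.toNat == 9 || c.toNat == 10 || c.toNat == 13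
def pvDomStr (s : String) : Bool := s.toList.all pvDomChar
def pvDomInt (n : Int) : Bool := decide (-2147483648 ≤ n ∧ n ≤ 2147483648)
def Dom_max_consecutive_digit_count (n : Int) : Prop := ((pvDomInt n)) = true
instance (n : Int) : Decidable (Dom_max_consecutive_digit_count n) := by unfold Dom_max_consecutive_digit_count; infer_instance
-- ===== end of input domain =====

-- B reorganises A's running-counter loop into breaks/boundaries lists and a max of boundary differences (objective: alternative decomposition, same cost).

-- shared first line of both Pythons: digits = [int(d) for d in str(n)]
-- int(d): PySem.Int.ofStr? is none exactly where Python raises ValueError; that happens only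
-- for the '-' character of a negative n, which Pre_ excludes, so the 0 default is unreachable.
def pvDigits (n : Int) : List Int :=
  (PySem.Int.toStr n).toList.map (fun c => (PySem.Int.ofStr? (String.mk [c])).getD 0)

-- ===== PORT A =====
def max_consecutive_digit_count (n : Int) : Int :=
  let digits := pvDigits n
  ((PySem.List.pyRange 1 ((digits.length : Int)) 1).foldl
    (fun (st : Int × Int) i =>
      if PySem.List.pyGetD digits i 0 = PySem.List.pyGetD digits (i - 1) 0 + 1 then
        (max st.1 (st.2 + 1), st.2 + 1)
      else (st.1, 1))
    (1, 1)).1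

-- ===== PORT B =====
def max_consecutive_digit_count_alt (n : Int) : Int :=
  let digits := pvDigits n
  let breaks := (PySem.List.pyRange 1 ((digits.length : Int)) 1).filter
    (fun i => decide ¬(PySem.List.pyGetD digits i 0 = PySem.List.pyGetD digits (i - 1) 0 + 1))
  let bounds : List Int := 0 :: (breaks ++ [((digits.length : Int))])
  -- max(generator): bounds always has ≥ 2 elements, so the diff list is nonempty and the getD default is unreachable
  ((PySem.List.max? ((bounds.zip bounds.tail).map (fun p => p.2 - p.1)) (fun x => x)).getD 1)

-- ===== PRECONDITION & SPEC =====
-- Pre_ excludes negative n, whose str() begins with a minus sign so that int('-') raises ValueError in A (and identically in B).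
def Pre_max_consecutive_digit_count (n : Int) : Prop := 0 ≤ n
instance (n : Int) : Decidable (Pre_max_consecutive_digit_count n) := by unfold Pre_max_consecutive_digit_count; infer_instance
def pvWitness_max_consecutive_digit_count : Int := 123

def Spec_max_consecutive_digit_count (n : Int) (out : Int) : Prop := out = max_consecutive_digit_count_alt n
instance (n : Int) (out : Int) : Decidable (Spec_max_consecutive_digit_count n out) := by unfold Spec_max_consecutive_digit_count; infer_instance

-- ===== CLAIM (what is proved, stated in full; the proofs are below) =====
def Claim_equal_max_consecutive_digit_count : Prop := ∀ (n : Int), Dom_max_consecutive_digit_count n → Pre_max_consecutive_digit_count n → Spec_max_consecutive_digit_count n (max_consecutive_digit_count n)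

-- ===== LEMMAS AND PROOFS =====

-- gaps between consecutive break positions (proof-side characterisation of B's diff list)
def pvInner (last : Int) : List Int → List Int
  | [] => []
  | b :: t => (b - last) :: pvInner b t

def pvBk (P : Int → Prop) [DecidablePred P] (L : Int) : List Int :=
  (PySem.List.pyRange 1 L 1).filter (fun i => decide ¬ P i)

theorem pv_getLastD_snoc (l : List Int) (a d : Int) : (l ++ [a]).getLastD d = a := by
  induction l generalizing d with
  | nil => rfl
  | cons h t ih => rw [List.cons_append, List.getLastD_cons, ih]

theorem pv_inner_snoc (last b : Int) (bs : List Int) :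
    pvInner last (bs ++ [b]) = pvInner last bs ++ [b - bs.getLastD last] := by
  induction bs generalizing last with
  | nil => rfl
  | cons h t ih => simp only [List.cons_append, pvInner, ih, List.getLastD_cons]

theorem pv_foldl_max_snoc (l : List Int) (x a : Int) :
    (l ++ [x]).foldl max a = max (l.foldl max a) x := by
  simp [List.foldl_append]

theorem pv_zip_diffs (last : Int) (bs : List Int) (L : Int) :
    (((last :: (bs ++ [L])).zip (bs ++ [L])).map (fun p : Int × Int => p.2 - p.1))
      = pvInner last bs ++ [L - bs.getLastD last] := by
  induction bs generalizing last with
  | nil => simp [pvInner]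
  | cons b t ih =>
    rw [List.getLastD_cons]
    simpa [pvInner] using ih b

theorem pv_max_shift (I c : Int) (h : 1 ≤ c) : max (max I c) (c + 1) = max I (c + 1) := by
  rcases le_total I c with h' | h'
  · rw [max_eq_right h', max_eq_right (by omega : c ≤ c + 1), max_eq_right (by omega : I ≤ c + 1)]
  · rw [max_eq_left h']

theorem pv_max_one (I c : Int) (h : 1 ≤ c) : max (max I c) 1 = max I c := by
  exact max_eq_left (le_trans h (le_max_right I c))

theorem pv_maxq (g : List Int) (c : Int) (hc : 0 ≤ c) (hg : ∀ y ∈ g.head?, 0 ≤ y) :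
    ((PySem.List.max? (g ++ [c]) (fun y => y)).getD 1) = max (g.foldl max 0) c := by
  cases g with
  | nil =>
    simp [PySem.List.max?_id_cons]
    omega
  | cons h t =>
    have hh : 0 ≤ h := hg h (by simp)
    simp [PySem.List.max?_id_cons]
    have : max 0 h = h := by omega
    rw [this]

theorem pv_inv (P : Int → Prop) [DecidablePred P] (m : Nat) :
    ((PySem.List.pyRange 1 ((m : Int) + 1) 1).foldl
        (fun (st : Int × Int) i =>
          if P i then (max st.1 (st.2 + 1), st.2 + 1) else (st.1, 1)) (1, 1))
      = (max ((pvInner 0 (pvBk P ((m : Int) + 1))).foldl max 0)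
             ((m : Int) + 1 - (pvBk P ((m : Int) + 1)).getLastD 0),
         (m : Int) + 1 - (pvBk P ((m : Int) + 1)).getLastD 0)
    ∧ 0 ≤ (pvBk P ((m : Int) + 1)).getLastD 0
    ∧ (pvBk P ((m : Int) + 1)).getLastD 0 ≤ (m : Int) := by
  induction m with
  | zero =>
    simp only [Nat.cast_zero, zero_add]
    have h0 : PySem.List.pyRange 1 1 1 = [] := PySem.List.pyRange_one_eq_nil le_rfl
    refine ⟨?_, ?_, ?_⟩
    · simp only [h0, pvBk, List.filter_nil, List.foldl_nil, pvInner, Prod.mk.injEq,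
        List.getLastD_nil]
      norm_num
    · simp [pvBk, h0]
    · simp [pvBk, h0]
  | succ m ih =>
    have hsplit : PySem.List.pyRange 1 (((m + 1 : Nat) : Int) + 1) 1
        = PySem.List.pyRange 1 ((m : Int) + 1) 1 ++ [(m : Int) + 1] := by
      push_cast
      exact PySem.List.pyRange_one_succ_right (by omega)
    have hbk : pvBk P (((m + 1 : Nat) : Int) + 1)
        = pvBk P ((m : Int) + 1)
          ++ (if P ((m : Int) + 1) then [] else [(m : Int) + 1]) := by
      unfold pvBk
      rw [hsplit, List.filter_append]
      congr 1
      by_cases hP : P ((m : Int) + 1) <;> simp [List.filter, hP]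
    obtain ⟨ihf, ihlb0, ihlbm⟩ := ih
    by_cases hP : P ((m : Int) + 1)
    · rw [hsplit, List.foldl_append, ihf, hbk, if_pos hP, List.append_nil]
      simp only [List.foldl_cons, List.foldl_nil]
      rw [if_pos hP]
      push_cast
      refine ⟨?_, by omega, by omega⟩
      have h2 : ((m : Int)) + 1 + 1 - (pvBk P ((m : Int) + 1)).getLastD 0
          = ((m : Int) + 1 - (pvBk P ((m : Int) + 1)).getLastD 0) + 1 := by ring
      rw [h2, pv_max_shift _ _ (by omega)]
    · rw [hsplit, List.foldl_append, ihf, hbk, if_neg hP]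
      simp only [List.foldl_cons, List.foldl_nil]
      rw [if_neg hP]
      rw [pv_inner_snoc, pv_foldl_max_snoc, pv_getLastD_snoc]
      push_cast
      have h3 : ((m : Int)) + 1 + 1 - ((m : Int) + 1) = 1 := by ring
      rw [h3, pv_max_one _ _ (by omega)]
      exact ⟨rfl, by omega, by omega⟩

-- length of str(n) is at least 1
theorem pv_toDigitsCore_len_ge (b : Nat) : ∀ (f n : Nat) (l : List Char),
    l.length ≤ (Nat.toDigitsCore b f n l).length := by
  intro f
  induction f with
  | zero => intro n l; simp [Nat.toDigitsCore]
  | succ f ih =>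
    intro n l
    simp only [Nat.toDigitsCore]
    split
    · simp
    · calc l.length ≤ (Nat.digitChar (n % b) :: l).length := by simp
        _ ≤ _ := ih _ _

theorem pv_toDigits_ne_nil (b n : Nat) : Nat.toDigits b n ≠ [] := by
  unfold Nat.toDigits
  simp only [Nat.toDigitsCore]
  split
  · simp
  · intro h
    have := pv_toDigitsCore_len_ge b n (n / b) [Nat.digitChar (n % b)]
    rw [h] at this
    simp at this

theorem pv_digits_ne_nil (n : Int) (h : 0 ≤ n) : pvDigits n ≠ [] := by
  unfold pvDigits
  rw [PySem.Int.toList_toStr]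
  unfold PySem.Int.toChars
  rw [if_neg (by omega)]
  simp [pv_toDigits_ne_nil]

-- ===== VERDICT (by name: the statement is the Claim_ definition above) =====
theorem max_consecutive_digit_count_spec : Claim_equal_max_consecutive_digit_count := by
  intro n _ hpre
  unfold Spec_max_consecutive_digit_count max_consecutive_digit_count max_consecutive_digit_count_alt
  have hne := pv_digits_ne_nil n hpre
  obtain ⟨m, hm⟩ : ∃ m, (pvDigits n).length = m + 1 := by
    cases h : (pvDigits n).length with
    | zero => exact absurd (List.length_eq_zero_iff.mp h) hne
    | succ k => exact ⟨k, rfl⟩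
  have hcast : (((pvDigits n).length : Int)) = (m : Int) + 1 := by rw [hm]; push_cast; ring
  have H := pv_inv (fun i => PySem.List.pyGetD (pvDigits n) i 0
      = PySem.List.pyGetD (pvDigits n) (i - 1) 0 + 1) m
  obtain ⟨Hf, Hlb0, Hlbm⟩ := H
  simp only [hcast, List.tail_cons]
  rw [Hf]
  have hbkdef : (PySem.List.pyRange 1 ((m : Int) + 1) 1).filter
      (fun i => decide ¬(PySem.List.pyGetD (pvDigits n) i 0
        = PySem.List.pyGetD (pvDigits n) (i - 1) 0 + 1))
      = pvBk (fun i => PySem.List.pyGetD (pvDigits n) i 0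
        = PySem.List.pyGetD (pvDigits n) (i - 1) 0 + 1) ((m : Int) + 1) := rfl
  rw [hbkdef, pv_zip_diffs]
  rw [pv_maxq _ _ (by omega) ?_]
  · cases hbs : pvBk (fun i => PySem.List.pyGetD (pvDigits n) i 0
        = PySem.List.pyGetD (pvDigits n) (i - 1) 0 + 1) ((m : Int) + 1) with
    | nil => simp [pvInner]
    | cons b t =>
      intro y hy
      simp only [pvInner, List.head?_cons, Option.mem_def, Option.some.injEq] at hy
      have hbmem : b ∈ pvBk (fun i => PySem.List.pyGetD (pvDigits n) i 0
          = PySem.List.pyGetD (pvDigits n) (i - 1) 0 + 1) ((m : Int) + 1) := by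
        rw [hbs]; exact List.mem_cons_self
      have := List.mem_filter.mp hbmem
      have hb1 : 1 ≤ b := ((PySem.List.mem_pyRange_one).mp this.1).1
      omega
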